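-- pv_equiv track=rewrite | github.com/volcengine/verl | atropos/environments/intern_bootcamp/internbootcamp_lib/internbootcamp/bootcamp/cknights/cknights.py | simulate_knights_placement
-- ===== SOURCE A (Python) =====
-- from collections import defaultdict, deque
--
-- def simulate_knights_placement(initial_knights):
--     current_knights = set()
--     coords = [tuple(knight) for knight in initial_knights]
--     if len(coords) != len(set(coords)):
--         return 0
--     for x, y in coords:
--         if not (-1e9 <= x <= 1e9 and -1e9 <= y <= 1e9):
--             return 0
--     current_knights = set(coords)
--     knight_moves = [(1,2), (1,-2), (-1,2), (-1,-2), (2,1), (2,-1), (-2,1), (-2,-1)]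
--     attack_counts = defaultdict(int)
--     for x, y in current_knights:
--         for dx, dy in knight_moves:
--             neighbor = (x + dx, y + dy)
--             attack_counts[neighbor] += 1
--     queue = deque()
--     in_queue = set()
--     for cell in attack_counts:
--         if attack_counts[cell] >=4 and cell not in current_knights:
--             queue.append(cell)
--             in_queue.add(cell)
--     while queue:
--         cell = queue.popleft()
--         in_queue.discard(cell)
--         if cell in current_knights:
--             continue
--         if attack_counts[cell] <4:
--             continue
--         current_knights.add(cell)
--         for dx, dy in knight_moves:
--             neighbor = (cell[0] + dx, cell[1] + dy)
--             attack_counts[neighbor] += 1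
--             if attack_counts[neighbor] >=4 and neighbor not in current_knights and neighbor not in in_queue:
--                 queue.append(neighbor)
--                 in_queue.add(neighbor)
--     return len(current_knights)
-- ===== SOURCE B (Python) =====
-- def simulate_knights_placement(initial_knights):
--     coords = [tuple(knight) for knight in initial_knights]
--     if len(set(coords)) < len(coords):
--         return 0
--     if any(abs(x) > 10**9 or abs(y) > 10**9 for x, y in coords):
--         return 0
--     moves = [(1,2), (1,-2), (-1,2), (-1,-2), (2,1), (2,-1), (-2,1), (-2,-1)]
--     knights = set(coords)
--
--     def attackers(c):
--         return sum((c[0] - dx, c[1] - dy) in knights for dx, dy in moves)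
--
--     # depth-first closure: a LIFO stack of pending cells, attack counts recomputed
--     # by membership on demand; `pending` mirrors the stack so no cell is stacked twice
--     pending = set()
--     stack = []
--     for k in coords:
--         for dx, dy in moves:
--             t = (k[0] + dx, k[1] + dy)
--             if t not in knights and t not in pending and attackers(t) >= 4:
--                 pending.add(t)
--                 stack.append(t)
--     while stack:
--         c = stack.pop()
--         pending.discard(c)
--         knights.add(c)
--         for dx, dy in moves:
--             t = (c[0] + dx, c[1] + dy)
--             if t not in knights and t not in pending and attackers(t) >= 4:
--                 pending.add(t)
--                 stack.append(t)
--     return len(knights)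
-- ===== Notes on version B (the rewrite author's own statement) =====
-- stated objective: alternative
-- what changed: B replaces A's FIFO breadth-first propagation with an incrementally maintained attack-count defaultdict by a LIFO depth-first closure that keeps no counts at all: it pops the most recently discovered cell, recomputes a cell's attackers by 8 set-membership probes on demand, and the Lean proof shows the two traversal orders are confluent (same final count at every fuel) via an inductive reachability predicate rather than a lockstep simulation.
import Mathlib
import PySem

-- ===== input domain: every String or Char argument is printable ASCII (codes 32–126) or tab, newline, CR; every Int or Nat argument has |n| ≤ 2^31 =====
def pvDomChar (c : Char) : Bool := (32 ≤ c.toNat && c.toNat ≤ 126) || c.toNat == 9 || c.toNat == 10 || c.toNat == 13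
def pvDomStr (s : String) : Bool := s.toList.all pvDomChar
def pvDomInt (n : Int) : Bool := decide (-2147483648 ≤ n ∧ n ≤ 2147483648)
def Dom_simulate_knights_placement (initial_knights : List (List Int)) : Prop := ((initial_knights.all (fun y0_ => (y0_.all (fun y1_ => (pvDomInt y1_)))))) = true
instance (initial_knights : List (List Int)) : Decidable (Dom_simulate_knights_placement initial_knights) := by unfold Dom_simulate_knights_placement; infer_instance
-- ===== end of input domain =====

-- B replaces A's FIFO breadth-first propagation with its incrementally maintained attack-count
-- defaultdict by a LIFO depth-first closure keeping no counts: it pops the most recently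
-- discovered pending cell and recounts a cell's 8 potential attackers by set membership on
-- demand (objective: alternative, same cost). The equivalence proof shows the two traversal
-- orders are confluent: both loops return the same knight count at every fuel.
-- Python's iteration order over a set/dict is not modelled; the ports use insertion order — the
-- returned COUNT is proved identical, and is independent of that order.

-- shared data helpers: the 8 knight moves, tuple unpacking 'x, y = row', cell arithmetic
def kmoves : List (Int × Int) := [(1,2),(1,-2),(-1,2),(-1,-2),(2,1),(2,-1),(-2,1),(-2,-1)]
def pvRowXY (r : List Int) : Int × Int := (r.getD 0 0, r.getD 1 0)  -- rows have length 2 under Pre_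
def pvTgt (c d : Int × Int) : Int × Int := (c.1 + d.1, c.2 + d.2)
-- fuel bounding the number of pops of each loop; both ports use the same fuel, and the proof
-- shows the two loops return the same count at EVERY fuel, so no termination argument is needed
def pvFuel (n : Nat) : Nat := 8 * n + 1180591620717411303424

-- ===== PORT A =====
-- one step of A's inner 'for dx, dy in knight_moves' (state: attack_counts, queue, in_queue)
def pvPushA (K1 : PySem.Set (Int × Int)) (c : Int × Int)
    (st : PySem.Dict (Int × Int) Int × List (Int × Int) × PySem.Set (Int × Int)) (d : Int × Int) :
    PySem.Dict (Int × Int) Int × List (Int × Int) × PySem.Set (Int × Int) :=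
  -- t := (x+dx, y+dy); attack_counts[t] += 1; push t if now ≥ 4, not a knight, not queued
  if 4 ≤ (st.1.modify (pvTgt c d) 0 (· + 1)).getD (pvTgt c d) 0 ∧ pvTgt c d ∉ K1 ∧ pvTgt c d ∉ st.2.2
  then (st.1.modify (pvTgt c d) 0 (· + 1), st.2.1 ++ [pvTgt c d], PySem.Set.add st.2.2 (pvTgt c d))
  else (st.1.modify (pvTgt c d) 0 (· + 1), st.2.1, st.2.2)

-- A's 'while queue' loop; q is the not-yet-popped part of the deque (popleft = head)
def pvLoopA : Nat → List (Int × Int) → PySem.Set (Int × Int) → PySem.Set (Int × Int) →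
    PySem.Dict (Int × Int) Int → Int
  | 0, _, _, K, _ => (K.length : Int)
  | Nat.succ _, [], _, K, _ => (K.length : Int)
  | Nat.succ f, c :: q, inq, K, m =>
      let inq1 := PySem.Set.discard inq c
      if c ∈ K then pvLoopA f q inq1 K m
      else if m.getD c 0 < 4 then pvLoopA f q inq1 K m
      else
        let K1 := PySem.Set.add K c
        let st := kmoves.foldl (pvPushA K1 c) (m, q, inq1)
        pvLoopA f st.2.1 st.2.2 K1 st.1

-- attack_counts built from the initial knights (defaultdict(int) increment loop)
def pvInitCountsA (K : PySem.Set (Int × Int)) : PySem.Dict (Int × Int) Int :=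
  K.foldl (fun m k => kmoves.foldl (fun m d => m.modify (pvTgt k d) 0 (· + 1)) m) PySem.Dict.empty

-- initial queue: cells of attack_counts with count ≥ 4 that are not knights, in dict order
def pvInitQueueA (m : PySem.Dict (Int × Int) Int) (K : PySem.Set (Int × Int)) : List (Int × Int) :=
  m.keys.filter (fun c => decide (4 ≤ m.getD c 0 ∧ c ∉ K))

def simulate_knights_placement (initial_knights : List (List Int)) : Int :=
  -- coords = [tuple(k) for k in initial_knights]: a row stays a List Int (tuples have any arity)
  if (PySem.Set.ofList initial_knights).length ≠ initial_knights.length then 0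
  else if initial_knights.any (fun r => decide (¬(-1000000000 ≤ (pvRowXY r).1 ∧
      (pvRowXY r).1 ≤ 1000000000 ∧ -1000000000 ≤ (pvRowXY r).2 ∧ (pvRowXY r).2 ≤ 1000000000))) then 0
  else
    pvLoopA (pvFuel initial_knights.length)
      (pvInitQueueA (pvInitCountsA (PySem.Set.ofList (initial_knights.map pvRowXY)))
        (PySem.Set.ofList (initial_knights.map pvRowXY)))
      (PySem.Set.ofList (pvInitQueueA (pvInitCountsA (PySem.Set.ofList (initial_knights.map pvRowXY)))
        (PySem.Set.ofList (initial_knights.map pvRowXY))))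
      (PySem.Set.ofList (initial_knights.map pvRowXY))
      (pvInitCountsA (PySem.Set.ofList (initial_knights.map pvRowXY)))

-- ===== PORT B =====
def pvSrc (c d : Int × Int) : Int × Int := (c.1 - d.1, c.2 - d.2)
-- attackers(c): count of the 8 knight-move sources of c that are current knights
def pvAtk (K : List (Int × Int)) (c : Int × Int) : Int :=
  ((kmoves.filter (fun d => pvSrc c d ∈ K)).length : Int)

-- B's push: 'if t not in knights and t not in pending and attackers(t) >= 4'
def pvPushB (K : PySem.Set (Int × Int)) (acc : List (Int × Int) × PySem.Set (Int × Int))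
    (t : Int × Int) : List (Int × Int) × PySem.Set (Int × Int) :=
  if t ∉ K ∧ t ∉ acc.2 ∧ 4 ≤ pvAtk K t then (acc.1 ++ [t], PySem.Set.add acc.2 t) else acc

-- B's 'while stack' loop: pop the LAST element, discard it from pending, add it to the
-- knights, then scan its 8 targets pushing by recount
def pvLoopB : Nat → List (Int × Int) → PySem.Set (Int × Int) → PySem.Set (Int × Int) → Int
  | 0, _, _, K => (K.length : Int)
  | Nat.succ f, st, pend, K =>
    match st.getLast? with
    | none => (K.length : Int)
    | some c =>
        pvLoopB f
          (kmoves.foldl (fun acc d => pvPushB (PySem.Set.add K c) acc (pvTgt c d))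
            (st.dropLast, PySem.Set.discard pend c)).1
          (kmoves.foldl (fun acc d => pvPushB (PySem.Set.add K c) acc (pvTgt c d))
            (st.dropLast, PySem.Set.discard pend c)).2
          (PySem.Set.add K c)

-- B's initial scan 'for k in coords: for dx, dy in moves: …' building (stack, pending)
def pvInitB (coords : List (Int × Int)) (K : PySem.Set (Int × Int)) :
    List (Int × Int) × PySem.Set (Int × Int) :=
  coords.foldl (fun acc k => kmoves.foldl (fun acc d => pvPushB K acc (pvTgt k d)) acc) ([], [])

def simulate_knights_placement_alt (initial_knights : List (List Int)) : Int :=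
  if (PySem.Set.ofList initial_knights).length < initial_knights.length then 0
  else if initial_knights.any (fun r => decide (1000000000 < |(pvRowXY r).1| ∨
      1000000000 < |(pvRowXY r).2|)) then 0
  else
    pvLoopB (pvFuel initial_knights.length)
      (pvInitB (initial_knights.map pvRowXY) (PySem.Set.ofList (initial_knights.map pvRowXY))).1
      (pvInitB (initial_knights.map pvRowXY) (PySem.Set.ofList (initial_knights.map pvRowXY))).2
      (PySem.Set.ofList (initial_knights.map pvRowXY))

-- ===== PRECONDITION & SPEC =====
-- Pre_ excludes exactly the inputs where the Pythons raise ValueError: a row of length ≠ 2 reached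
-- by the unpacking 'for x, y in coords' (rows of any length are fine when a duplicate row makes
-- both functions return 0 before unpacking).
def Pre_simulate_knights_placement (initial_knights : List (List Int)) : Prop :=
  ¬ initial_knights.Nodup ∨ ∀ r ∈ initial_knights, r.length = 2
instance (initial_knights : List (List Int)) : Decidable (Pre_simulate_knights_placement initial_knights) := by
  unfold Pre_simulate_knights_placement; infer_instance

def pvWitness_simulate_knights_placement : List (List Int) := [[0, 0], [1, 2]]

def Spec_simulate_knights_placement (initial_knights : List (List Int)) (out : Int) : Prop :=
  out = simulate_knights_placement_alt initial_knights
instance (initial_knights : List (List Int)) (out : Int) : Decidable (Spec_simulate_knights_placement initial_knights out) := by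
  unfold Spec_simulate_knights_placement; infer_instance

-- ===== CLAIM (what is proved, stated in full; the proofs are below) =====
def Claim_equal_simulate_knights_placement : Prop := ∀ (initial_knights : List (List Int)), Dom_simulate_knights_placement initial_knights → Pre_simulate_knights_placement initial_knights → Spec_simulate_knights_placement initial_knights (simulate_knights_placement initial_knights)

-- ===== LEMMAS AND PROOFS =====

theorem kmoves_nodup : kmoves.Nodup := by decide

theorem pvTgt_eq_iff (c d : Int × Int) (x : Int × Int) : x = pvTgt c d ↔ d = pvSrc x c := by
  unfold pvTgt pvSrc
  constructor <;> intro h <;>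
    · apply Prod.ext <;> simp [h]

theorem mem_map_tgt (c x : Int × Int) (ds : List (Int × Int)) :
    x ∈ ds.map (pvTgt c) ↔ pvSrc x c ∈ ds := by
  simp only [List.mem_map]
  constructor
  · rintro ⟨d, hd, rfl⟩
    rwa [show pvSrc (pvTgt c d) c = d by unfold pvTgt pvSrc; apply Prod.ext <;> simp]
  · intro h
    exact ⟨pvSrc x c, h, ((pvTgt_eq_iff c (pvSrc x c) x).2 rfl).symm⟩

theorem map_tgt_nodup (c : Int × Int) : (kmoves.map (pvTgt c)).Nodup := by
  apply List.Nodup.map_on _ kmoves_nodup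
  intro d _ d' _ h
  unfold pvTgt at h
  have h1 := congrArg Prod.fst h
  have h2 := congrArg Prod.snd h
  simp at h1 h2
  apply Prod.ext <;> omega

-- pvAtk depends only on membership
theorem pvAtk_congr (L L' : List (Int × Int)) (h : ∀ a, a ∈ L ↔ a ∈ L') (x : Int × Int) :
    pvAtk L x = pvAtk L' x := by
  unfold pvAtk
  congr 2
  apply List.filter_congr
  intro d _
  simp [h]

theorem pvSrc_eq_iff (x k d : Int × Int) : pvSrc x d = k ↔ d = pvSrc x k := by
  unfold pvSrc
  constructor <;> intro h <;>
    [skip; skip] <;>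
    · have h1 := congrArg Prod.fst h
      have h2 := congrArg Prod.snd h
      simp at h1 h2
      apply Prod.ext <;> simp <;> omega

theorem atk_filter_aux (L : List (Int × Int)) (k : Int × Int) (hk : k ∉ L) (x : Int × Int) :
    ∀ ds : List (Int × Int),
      (ds.filter (fun d => decide (pvSrc x d ∈ L) || decide (pvSrc x d = k))).length =
        (ds.filter (fun d => decide (pvSrc x d ∈ L))).length + ds.count (pvSrc x k)
  | [] => by simp
  | d :: ds => by
    have ih := atk_filter_aux L k hk x ds
    simp only [List.filter_cons, List.count_cons, beq_iff_eq]
    by_cases hkd : pvSrc x d = k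
    · have h1 : pvSrc x d ∉ L := by rw [hkd]; exact hk
      have hd : d = pvSrc x k := (pvSrc_eq_iff x k d).1 hkd
      subst hd
      simp [hkd, ih]
      rw [if_neg hk]
      omega
    · have hd : d ≠ pvSrc x k := fun h => hkd ((pvSrc_eq_iff x k d).2 h)
      by_cases h1 : pvSrc x d ∈ L
      · simp [hkd, h1, hd, ih]
        omega
      · simp [hkd, h1, hd, ih]

theorem pvAtk_append_add (L : List (Int × Int)) (k : Int × Int) (hk : k ∉ L) (x : Int × Int) :
    pvAtk (L ++ [k]) x = pvAtk L x + (if pvSrc x k ∈ kmoves then 1 else 0) := by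
  unfold pvAtk
  have hpred : ∀ d : Int × Int, decide (pvSrc x d ∈ L ++ [k]) =
      (decide (pvSrc x d ∈ L) || decide (pvSrc x d = k)) := by
    intro d; simp [List.mem_append]
  rw [List.filter_congr (fun d _ => hpred d), atk_filter_aux L k hk x kmoves]
  have hcnt : kmoves.count (pvSrc x k) = if pvSrc x k ∈ kmoves then 1 else 0 := by
    by_cases h : pvSrc x k ∈ kmoves
    · simp [List.count_eq_one_of_mem kmoves_nodup h, h]
    · simp [List.count_eq_zero_of_not_mem h, h]
  rw [hcnt]
  by_cases h : pvSrc x k ∈ kmoves <;> simp [h]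

theorem pvAtk_pos_mem (L : List (Int × Int)) (x : Int × Int) (h : 0 < pvAtk L x) :
    ∃ d ∈ kmoves, pvSrc x d ∈ L := by
  unfold pvAtk at h
  rcases List.exists_mem_of_length_pos (by exact_mod_cast h) with ⟨d, hd⟩
  have := List.mem_filter.1 hd
  exact ⟨d, this.1, by simpa using this.2⟩

-- count of a cell among all attacked targets of a Nodup knight list = pvAtk
theorem pvAtk_nil (x : Int × Int) : pvAtk [] x = 0 := by
  unfold pvAtk; simp

theorem count_map_tgt (k : Int × Int) (x : Int × Int) :
    (kmoves.map (pvTgt k)).count x = if pvSrc x k ∈ kmoves then 1 else 0 := by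
  have hinj : Function.Injective (pvTgt k) := by
    intro d d' h
    unfold pvTgt at h
    have h1 := congrArg Prod.fst h
    have h2 := congrArg Prod.snd h
    simp at h1 h2
    apply Prod.ext <;> omega
  by_cases h : pvSrc x k ∈ kmoves
  · have hx : x = pvTgt k (pvSrc x k) := by
      unfold pvTgt pvSrc; apply Prod.ext <;> simp
    rw [if_pos h, hx, List.count_map_of_injective _ _ hinj]
    exact List.count_eq_one_of_mem kmoves_nodup h
  · rw [if_neg h]
    apply List.count_eq_zero_of_not_mem
    rw [mem_map_tgt]
    exact h

theorem count_flatMap_tgt (L : List (Int × Int)) (hL : L.Nodup) (x : Int × Int) :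
    ((L.flatMap (fun k => kmoves.map (pvTgt k))).count x : Int) = pvAtk L x := by
  induction L with
  | nil => simp [pvAtk_nil]
  | cons k L ih =>
    have hk : k ∉ L := (List.nodup_cons.1 hL).1
    have hL' : L.Nodup := (List.nodup_cons.1 hL).2
    have hmem : ∀ a, a ∈ (k :: L : List (Int × Int)) ↔ a ∈ L ++ [k] := by
      intro a; simp [or_comm]
    rw [List.flatMap_cons, List.count_append,
        pvAtk_congr (k :: L) (L ++ [k]) hmem x, pvAtk_append_add L k hk x, ← ih hL',
        count_map_tgt k x]
    by_cases h : pvSrc x k ∈ kmoves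
    · rw [if_pos h, if_pos h]; push_cast; ring
    · rw [if_neg h, if_neg h]; push_cast; ring

theorem src_src (x d : Int × Int) : pvSrc x (pvSrc x d) = d := by
  unfold pvSrc
  apply Prod.ext <;> simp

-- dup check: A's via set size ≠, B's via set size <
theorem ofList_sublist {α : Type} [BEq α] [LawfulBEq α] (xs : List α) :
    (PySem.Set.ofList xs).Sublist xs := by
  induction xs with
  | nil => simp
  | cons x xs ih =>
    rw [PySem.Set.ofList_cons]
    exact List.Sublist.cons₂ x (List.Sublist.trans List.filter_sublist ih)

theorem ofList_length_eq_iff_nodup {α : Type} [BEq α] [LawfulBEq α] (xs : List α) :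
    (PySem.Set.ofList xs).length = xs.length ↔ xs.Nodup := by
  constructor
  · intro h
    have := (ofList_sublist xs).eq_of_length h
    rw [← this]
    exact PySem.Set.nodup_ofList xs
  · intro h
    rw [PySem.Set.ofList_eq_self_of_nodup xs h]

-- reachability: the closure the simulated process computes, as an inductive predicate;
-- a cell is reachable if initial, or if 4 distinct knight moves lead to it from reachable cells
inductive pvReach (I : List (Int × Int)) : (Int × Int) → Prop
  | base (c : Int × Int) : c ∈ I → pvReach I c
  | step (c : Int × Int) (ds : List (Int × Int)) (h1 : ds.Nodup) (h2 : ∀ d ∈ ds, d ∈ kmoves)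
      (h3 : 4 ≤ ds.length) (h4 : ∀ d ∈ ds, pvReach I (pvSrc c d)) : pvReach I c

theorem reach_of_atk (I : List (Int × Int)) (K : List (Int × Int)) (c : Int × Int)
    (hK : ∀ x ∈ K, pvReach I x) (h : 4 ≤ pvAtk K c) : pvReach I c := by
  refine pvReach.step c (kmoves.filter (fun d => decide (pvSrc c d ∈ K)))
    (List.Nodup.filter _ kmoves_nodup) (fun d hd => List.mem_of_mem_filter hd) ?_ ?_
  · unfold pvAtk at h
    exact_mod_cast h
  · intro d hd
    exact hK _ (by simpa using (List.mem_filter.1 hd).2)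

theorem mem_of_reach_closed (I : List (Int × Int)) (K : List (Int × Int))
    (hI : ∀ x ∈ I, x ∈ K) (hcl : ∀ x, x ∉ K → pvAtk K x < 4) (c : Int × Int)
    (hr : pvReach I c) : c ∈ K := by
  induction hr with
  | base c hc => exact hI c hc
  | step c ds h1 h2 h3 _ ih =>
    by_contra hc
    have hsub : ds ⊆ kmoves.filter (fun d => decide (pvSrc c d ∈ K)) := by
      intro d hd
      exact List.mem_filter.2 ⟨h2 d hd, by simpa using ih d hd⟩
    have hlen : ds.length ≤ (kmoves.filter (fun d => decide (pvSrc c d ∈ K))).length :=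
      (List.subperm_of_subset h1 hsub).length_le
    have := hcl c hc
    unfold pvAtk at this
    omega

-- the loop invariant shared by A's queue and B's stack: q is exactly the set of pending cells
def pvInv (I K q : List (Int × Int)) : Prop :=
  K.Nodup ∧ q.Nodup ∧ (∀ x ∈ I, x ∈ K) ∧ (∀ x ∈ K, pvReach I x) ∧
  (∀ x ∈ q, x ∉ K ∧ 4 ≤ pvAtk K x) ∧ (∀ x, x ∉ K → 4 ≤ pvAtk K x → x ∈ q)

-- if the pending set is empty, K is the reachability closure; any other invariant state with
-- the same |K| must then also have an empty pending set
theorem closed_absurd (I K1 K2 q2 : List (Int × Int)) (c : Int × Int)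
    (hInv1 : pvInv I K1 []) (hInv2 : pvInv I K2 q2) (hc : c ∈ q2)
    (hlen : K1.length = K2.length) : False := by
  obtain ⟨hK1nd, -, hI1, hR1, -, hcov1⟩ := hInv1
  obtain ⟨hK2nd, hq2nd, -, hR2, hq2, -⟩ := hInv2
  have hcl : ∀ x, x ∉ K1 → pvAtk K1 x < 4 := by
    intro x hx
    by_contra h
    exact absurd (hcov1 x hx (by omega)) (List.not_mem_nil)
  obtain ⟨hcK2, hc4⟩ := hq2 c hc
  have hcR : pvReach I c := reach_of_atk I K2 c hR2 hc4
  have hsub : (K2 ++ [c]) ⊆ K1 := by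
    intro x hx
    rcases List.mem_append.1 hx with hx | hx
    · exact mem_of_reach_closed I K1 hI1 hcl x (hR2 x hx)
    · rw [List.mem_singleton.1 hx]
      exact mem_of_reach_closed I K1 hI1 hcl c hcR
  have hnd : (K2 ++ [c]).Nodup := by
    rw [List.nodup_append]
    exact ⟨hK2nd, List.nodup_singleton c, by
      intro a ha b hb
      rw [List.mem_singleton] at hb
      subst hb
      exact fun h => hcK2 (h ▸ ha)⟩
  have := (List.subperm_of_subset hnd hsub).length_le
  simp at this
  omega

-- characterization of A's inner 8-move fold
theorem pushA_fold (K1 : PySem.Set (Int × Int)) (c : Int × Int) :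
    ∀ (ds : List (Int × Int)) (m : PySem.Dict (Int × Int) Int) (q : List (Int × Int))
      (inq : PySem.Set (Int × Int)), (ds.map (pvTgt c)).Nodup →
      ((ds.foldl (pvPushA K1 c) (m, q, inq)).2.1 =
          q ++ (ds.map (pvTgt c)).filter (fun t => decide (4 ≤ m.getD t 0 + 1 ∧ t ∉ K1 ∧ t ∉ inq))) ∧
      (∀ x, (ds.foldl (pvPushA K1 c) (m, q, inq)).1.getD x 0 =
          m.getD x 0 + (if x ∈ ds.map (pvTgt c) then 1 else 0)) ∧
      (∀ x, x ∈ (ds.foldl (pvPushA K1 c) (m, q, inq)).2.2 ↔ x ∈ inq ∨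
          x ∈ (ds.map (pvTgt c)).filter (fun t => decide (4 ≤ m.getD t 0 + 1 ∧ t ∉ K1 ∧ t ∉ inq)))
  | [], m, q, inq, _ => by simp
  | d :: ds, m, q, inq, hnd => by
    have hndc : (pvTgt c d :: ds.map (pvTgt c)).Nodup := by simpa using hnd
    have hnotin : pvTgt c d ∉ ds.map (pvTgt c) := (List.nodup_cons.1 hndc).1
    have hndtail : (ds.map (pvTgt c)).Nodup := (List.nodup_cons.1 hndc).2
    have hm1self : (m.modify (pvTgt c d) 0 (· + 1)).getD (pvTgt c d) 0 = m.getD (pvTgt c d) 0 + 1 :=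
      PySem.Dict.getD_modify_self m (pvTgt c d) 0 (· + 1)
    have hm1ne : ∀ x, x ≠ pvTgt c d → (m.modify (pvTgt c d) 0 (· + 1)).getD x 0 = m.getD x 0 :=
      fun x hx => PySem.Dict.getD_modify_of_ne m 0 (· + 1) hx
    rw [List.foldl_cons]
    by_cases hC : 4 ≤ m.getD (pvTgt c d) 0 + 1 ∧ pvTgt c d ∉ K1 ∧ pvTgt c d ∉ inq
    · have hstep : pvPushA K1 c (m, q, inq) d =
          (m.modify (pvTgt c d) 0 (· + 1), q ++ [pvTgt c d], PySem.Set.add inq (pvTgt c d)) := by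
        unfold pvPushA
        rw [if_pos ⟨by rw [hm1self]; exact hC.1, hC.2.1, hC.2.2⟩]
      rw [hstep]
      obtain ⟨ih1, ih2, ih3⟩ := pushA_fold K1 c ds (m.modify (pvTgt c d) 0 (· + 1)) (q ++ [pvTgt c d])
        (PySem.Set.add inq (pvTgt c d)) hndtail
      have hfilter : (ds.map (pvTgt c)).filter (fun t =>
            decide (4 ≤ (m.modify (pvTgt c d) 0 (· + 1)).getD t 0 + 1 ∧ t ∉ K1 ∧
              t ∉ PySem.Set.add inq (pvTgt c d))) =
          (ds.map (pvTgt c)).filter (fun t => decide (4 ≤ m.getD t 0 + 1 ∧ t ∉ K1 ∧ t ∉ inq)) := by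
        apply List.filter_congr
        intro x hx
        have hne : x ≠ pvTgt c d := fun h => hnotin (h ▸ hx)
        have e1 := hm1ne x hne
        have e2 : x ∈ PySem.Set.add inq (pvTgt c d) ↔ x ∈ inq := by
          rw [PySem.Set.mem_add]
          exact or_iff_left hne
        rw [decide_eq_decide, e1, e2]
      have hcd : decide (4 ≤ m.getD (pvTgt c d) 0 + 1 ∧ pvTgt c d ∉ K1 ∧ pvTgt c d ∉ inq) = true :=
        decide_eq_true hC
      have hconsP : List.filter (fun t => decide (4 ≤ m.getD t 0 + 1 ∧ t ∉ K1 ∧ t ∉ inq))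
            (pvTgt c d :: List.map (pvTgt c) ds) =
          pvTgt c d :: List.filter (fun t => decide (4 ≤ m.getD t 0 + 1 ∧ t ∉ K1 ∧ t ∉ inq))
            (List.map (pvTgt c) ds) := List.filter_cons_of_pos hcd
      refine ⟨?_, ?_, ?_⟩
      · rw [ih1, hfilter, List.map_cons, hconsP]
        simp
      · intro x
        rw [ih2 x]
        by_cases hx : x = pvTgt c d
        · subst hx
          rw [hm1self]
          simp [hnotin]
        · rw [hm1ne x hx]
          by_cases hmem : x ∈ List.map (pvTgt c) ds <;> simp [hmem, hx]
      · intro x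
        rw [ih3 x, hfilter, List.map_cons, hconsP, PySem.Set.mem_add]
        simp only [List.mem_cons]
        tauto
    · have hstep : pvPushA K1 c (m, q, inq) d =
          (m.modify (pvTgt c d) 0 (· + 1), q, inq) := by
        unfold pvPushA
        rw [if_neg (by rw [hm1self]; exact hC)]
      rw [hstep]
      obtain ⟨ih1, ih2, ih3⟩ := pushA_fold K1 c ds (m.modify (pvTgt c d) 0 (· + 1)) q inq hndtail
      have hfilter : (ds.map (pvTgt c)).filter (fun t =>
            decide (4 ≤ (m.modify (pvTgt c d) 0 (· + 1)).getD t 0 + 1 ∧ t ∉ K1 ∧ t ∉ inq)) =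
          (ds.map (pvTgt c)).filter (fun t => decide (4 ≤ m.getD t 0 + 1 ∧ t ∉ K1 ∧ t ∉ inq)) := by
        apply List.filter_congr
        intro x hx
        have hne : x ≠ pvTgt c d := fun h => hnotin (h ▸ hx)
        rw [decide_eq_decide, hm1ne x hne]
      have hcd : decide (4 ≤ m.getD (pvTgt c d) 0 + 1 ∧ pvTgt c d ∉ K1 ∧ pvTgt c d ∉ inq) = false :=
        decide_eq_false hC
      have hconsN : List.filter (fun t => decide (4 ≤ m.getD t 0 + 1 ∧ t ∉ K1 ∧ t ∉ inq))
            (pvTgt c d :: List.map (pvTgt c) ds) =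
          List.filter (fun t => decide (4 ≤ m.getD t 0 + 1 ∧ t ∉ K1 ∧ t ∉ inq))
            (List.map (pvTgt c) ds) := List.filter_cons_of_neg (by simp [hcd])
      refine ⟨?_, ?_, ?_⟩
      · rw [ih1, hfilter, List.map_cons, hconsN]
      · intro x
        rw [ih2 x]
        by_cases hx : x = pvTgt c d
        · subst hx
          rw [hm1self]
          simp [hnotin]
        · rw [hm1ne x hx]
          by_cases hmem : x ∈ List.map (pvTgt c) ds <;> simp [hmem, hx]
      · intro x
        rw [ih3 x, hfilter, List.map_cons, hconsN]

-- A's step from an invariant state reaches an invariant state with one more knight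
theorem stepA (I : List (Int × Int)) (K q inq : PySem.Set (Int × Int))
    (m : PySem.Dict (Int × Int) Int) (c : Int × Int)
    (hInv : pvInv I K (c :: q))
    (hm : ∀ x, m.getD x 0 = pvAtk K x)
    (hinq : ∀ x, x ∈ inq ↔ x ∈ (c :: q)) :
    pvInv I (PySem.Set.add K c)
      (kmoves.foldl (pvPushA (PySem.Set.add K c) c) (m, q, PySem.Set.discard inq c)).2.1 ∧
    (∀ x, (kmoves.foldl (pvPushA (PySem.Set.add K c) c) (m, q, PySem.Set.discard inq c)).1.getD x 0 =
        pvAtk (PySem.Set.add K c) x) ∧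
    (∀ x, x ∈ (kmoves.foldl (pvPushA (PySem.Set.add K c) c) (m, q, PySem.Set.discard inq c)).2.2 ↔
        x ∈ (kmoves.foldl (pvPushA (PySem.Set.add K c) c) (m, q, PySem.Set.discard inq c)).2.1) ∧
    (PySem.Set.add K c).length = K.length + 1 := by
  obtain ⟨hKnd, hq, hI, hR, hqK, hcov⟩ := hInv
  obtain ⟨hcK, hcatk⟩ := hqK c (by simp)
  have hcq : c ∉ q := (List.nodup_cons.1 hq).1
  have hqnd : q.Nodup := (List.nodup_cons.1 hq).2
  have haddK : PySem.Set.add K c = K ++ [c] := PySem.Set.add_of_not_mem hcK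
  have hmemK1 : ∀ x, x ∈ PySem.Set.add K c ↔ x ∈ K ∨ x = c := by
    intro x; rw [haddK]; simp
  have hatk1 : ∀ x, pvAtk (PySem.Set.add K c) x =
      pvAtk K x + (if pvSrc x c ∈ kmoves then 1 else 0) := by
    intro x; rw [haddK]; exact pvAtk_append_add K c hcK x
  have hdisq : ∀ x, x ∈ PySem.Set.discard inq c ↔ x ∈ q := by
    intro x
    rw [PySem.Set.mem_discard, hinq x]
    constructor
    · rintro ⟨hx, hne⟩
      rcases List.mem_cons.1 hx with rfl | h
      · exact absurd rfl hne
      · exact h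
    · intro hx
      exact ⟨List.mem_cons_of_mem c hx, fun h => hcq (h ▸ hx)⟩
  obtain ⟨hf1, hf2, hf3⟩ := pushA_fold (PySem.Set.add K c) c kmoves m q
    (PySem.Set.discard inq c) (map_tgt_nodup c)
  -- the batch pushed this round
  have hpushmem : ∀ x ∈ (kmoves.map (pvTgt c)).filter (fun t =>
        decide (4 ≤ m.getD t 0 + 1 ∧ t ∉ PySem.Set.add K c ∧ t ∉ PySem.Set.discard inq c)),
      x ∉ PySem.Set.add K c ∧ 4 ≤ pvAtk (PySem.Set.add K c) x ∧ x ∉ q := by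
    intro x hx
    have hcond := List.of_mem_filter hx
    have hx' := List.mem_of_mem_filter hx
    simp only [decide_eq_true_eq] at hcond
    obtain ⟨h4, hnK, hnq⟩ := hcond
    have hsrc : pvSrc x c ∈ kmoves := (mem_map_tgt c x kmoves).1 hx'
    refine ⟨hnK, ?_, fun h => hnq ((hdisq x).2 h)⟩
    rw [hatk1 x, if_pos hsrc, ← hm x]
    omega
  have hlen1 : (PySem.Set.add K c).length = K.length + 1 := by
    rw [haddK]; simp
  refine ⟨⟨?_, ?_, ?_, ?_, ?_, ?_⟩, ?_, ?_, hlen1⟩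
  · -- K1 nodup
    rw [haddK, List.nodup_append]
    exact ⟨hKnd, List.nodup_singleton c, by
      intro a ha b hb
      rw [List.mem_singleton] at hb
      subst hb
      exact fun h => hcK (h ▸ ha)⟩
  · -- new queue nodup
    rw [hf1, List.nodup_append]
    refine ⟨hqnd, List.Nodup.filter _ (map_tgt_nodup c), ?_⟩
    intro a ha b hb
    exact fun h => (hpushmem b hb).2.2 (h ▸ ha)
  · -- I ⊆ K1
    intro x hx
    exact (hmemK1 x).2 (Or.inl (hI x hx))
  · -- reach
    intro x hx
    rcases (hmemK1 x).1 hx with hx | rfl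
    · exact hR x hx
    · exact reach_of_atk I K x hR hcatk
  · -- queue elements pending-valid
    intro x hx
    rw [hf1] at hx
    rcases List.mem_append.1 hx with hxq | hxp
    · obtain ⟨hxK, hx4⟩ := hqK x (List.mem_cons_of_mem c hxq)
      refine ⟨fun h => ?_, ?_⟩
      · rcases (hmemK1 x).1 h with h' | rfl
        · exact hxK h'
        · exact hcq hxq
      · rw [hatk1 x]
        by_cases hsx : pvSrc x c ∈ kmoves <;> simp [hsx] <;> omega
    · exact ⟨(hpushmem x hxp).1, (hpushmem x hxp).2.1⟩
  · -- coverage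
    intro x hxK1 hx4
    rw [hf1, List.mem_append]
    by_cases h4 : 4 ≤ pvAtk K x
    · have hxK : x ∉ K := fun h => hxK1 ((hmemK1 x).2 (Or.inl h))
      rcases List.mem_cons.1 (hcov x hxK h4) with rfl | hxq
      · exact absurd ((hmemK1 x).2 (Or.inr rfl)) hxK1
      · exact Or.inl hxq
    · have hsx : pvSrc x c ∈ kmoves := by
        by_contra hno
        rw [hatk1 x, if_neg hno] at hx4
        omega
      by_cases hxq : x ∈ q
      · exact Or.inl hxq
      · refine Or.inr (List.mem_filter.2 ⟨(mem_map_tgt c x kmoves).2 hsx, ?_⟩)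
        have := hm x
        refine decide_eq_true ⟨by rw [hm x]; rw [hatk1 x, if_pos hsx] at hx4; omega, hxK1, ?_⟩
        exact fun h => hxq ((hdisq x).1 h)
  · -- counts track atk
    intro x
    rw [hf2 x, hm x, hatk1 x]
    by_cases hsx : pvSrc x c ∈ kmoves
    · rw [if_pos hsx, if_pos ((mem_map_tgt c x kmoves).2 hsx)]
    · rw [if_neg hsx, if_neg (fun h => hsx ((mem_map_tgt c x kmoves).1 h))]
  · -- in_queue mirrors the queue
    intro x
    rw [hf3 x, hf1, hdisq x, List.mem_append]

-- characterization of B's push fold over any list of target cells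
theorem pushB_fold (K : PySem.Set (Int × Int)) :
    ∀ (ts : List (Int × Int)) (acc : List (Int × Int) × PySem.Set (Int × Int)),
      acc.1.Nodup → (∀ x, x ∈ acc.2 ↔ x ∈ acc.1) →
      ((ts.foldl (pvPushB K) acc).1.Nodup ∧
       (∀ x, x ∈ (ts.foldl (pvPushB K) acc).2 ↔ x ∈ (ts.foldl (pvPushB K) acc).1) ∧
       (∀ x, x ∈ (ts.foldl (pvPushB K) acc).1 ↔
          x ∈ acc.1 ∨ (x ∈ ts ∧ x ∉ K ∧ 4 ≤ pvAtk K x)))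
  | [], acc, h1, h2 => ⟨h1, h2, fun x => by simp⟩
  | t :: ts, acc, h1, h2 => by
    rw [List.foldl_cons]
    by_cases hc : t ∉ K ∧ t ∉ acc.2 ∧ 4 ≤ pvAtk K t
    · have hstep : pvPushB K acc t = (acc.1 ++ [t], PySem.Set.add acc.2 t) := by
        unfold pvPushB; rw [if_pos hc]
      rw [hstep]
      have ht1 : t ∉ acc.1 := fun h => hc.2.1 ((h2 t).2 h)
      have h1' : (acc.1 ++ [t]).Nodup := by
        rw [List.nodup_append]
        exact ⟨h1, List.nodup_singleton t, by
          intro a ha b hb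
          rw [List.mem_singleton] at hb
          subst hb
          exact fun h => ht1 (h ▸ ha)⟩
      have h2' : ∀ x, x ∈ PySem.Set.add acc.2 t ↔ x ∈ acc.1 ++ [t] := by
        intro x
        rw [PySem.Set.mem_add, List.mem_append, List.mem_singleton, h2]
      obtain ⟨i1, i2, i3⟩ := pushB_fold K ts (acc.1 ++ [t], PySem.Set.add acc.2 t) h1' h2'
      refine ⟨i1, i2, ?_⟩
      intro x
      rw [i3 x]
      show x ∈ acc.1 ++ [t] ∨ _ ↔ _
      rw [List.mem_append, List.mem_singleton, List.mem_cons]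
      constructor
      · rintro ((hx | rfl) | ⟨hts, hC⟩)
        · exact Or.inl hx
        · exact Or.inr ⟨Or.inl rfl, hc.1, hc.2.2⟩
        · exact Or.inr ⟨Or.inr hts, hC⟩
      · rintro (hx | ⟨rfl | hts, hC⟩)
        · exact Or.inl (Or.inl hx)
        · exact Or.inl (Or.inr rfl)
        · exact Or.inr ⟨hts, hC⟩
    · have hstep : pvPushB K acc t = acc := by
        unfold pvPushB; rw [if_neg hc]
      rw [hstep]
      obtain ⟨i1, i2, i3⟩ := pushB_fold K ts acc h1 h2
      refine ⟨i1, i2, ?_⟩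
      intro x
      rw [i3 x, List.mem_cons]
      constructor
      · rintro (hx | ⟨hts, hC⟩)
        · exact Or.inl hx
        · exact Or.inr ⟨Or.inr hts, hC⟩
      · rintro (hx | ⟨rfl | hts, hC⟩)
        · exact Or.inl hx
        · refine Or.inl ((h2 x).1 ?_)
          by_contra h
          exact hc ⟨hC.1, h, hC.2⟩
        · exact Or.inr ⟨hts, hC⟩

-- B's step from an invariant state reaches an invariant state with one more knight
theorem stepB (I : List (Int × Int)) (st pend K : PySem.Set (Int × Int)) (c : Int × Int)
    (hInv : pvInv I K st)
    (hpend : ∀ x, x ∈ pend ↔ x ∈ st)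
    (hlast : st.getLast? = some c) :
    pvInv I (PySem.Set.add K c)
      ((kmoves.map (pvTgt c)).foldl (pvPushB (PySem.Set.add K c))
        (st.dropLast, PySem.Set.discard pend c)).1 ∧
    (∀ x, x ∈ ((kmoves.map (pvTgt c)).foldl (pvPushB (PySem.Set.add K c))
        (st.dropLast, PySem.Set.discard pend c)).2 ↔
      x ∈ ((kmoves.map (pvTgt c)).foldl (pvPushB (PySem.Set.add K c))
        (st.dropLast, PySem.Set.discard pend c)).1) ∧
    (PySem.Set.add K c).length = K.length + 1 := by
  obtain ⟨hKnd, hstnd, hI, hR, hstK, hcov⟩ := hInv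
  have hstne : st ≠ [] := by
    intro h; subst h; simp at hlast
  have hsplit : st.dropLast ++ [c] = st := List.dropLast_append_getLast? c hlast
  have hdlnd : st.dropLast.Nodup ∧ c ∉ st.dropLast := by
    rw [← hsplit] at hstnd
    rw [List.nodup_append] at hstnd
    exact ⟨hstnd.1, fun h => hstnd.2.2 c h c (by simp) rfl⟩
  have hmemst : ∀ x, x ∈ st ↔ x ∈ st.dropLast ∨ x = c := by
    intro x; rw [← hsplit]; simp
  have hcst : c ∈ st := by rw [hmemst]; exact Or.inr rfl
  obtain ⟨hcK, hcatk⟩ := hstK c hcst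
  have haddK : PySem.Set.add K c = K ++ [c] := PySem.Set.add_of_not_mem hcK
  have hmemK1 : ∀ x, x ∈ PySem.Set.add K c ↔ x ∈ K ∨ x = c := by
    intro x; rw [haddK]; simp
  have hatk1 : ∀ x, pvAtk (PySem.Set.add K c) x =
      pvAtk K x + (if pvSrc x c ∈ kmoves then 1 else 0) := by
    intro x; rw [haddK]; exact pvAtk_append_add K c hcK x
  have hdisc : ∀ x, x ∈ PySem.Set.discard pend c ↔ x ∈ st.dropLast := by
    intro x
    rw [PySem.Set.mem_discard, hpend x, hmemst x]
    constructor
    · rintro ⟨hx | rfl, hne⟩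
      · exact hx
      · exact absurd rfl hne
    · intro hx
      exact ⟨Or.inl hx, fun h => hdlnd.2 (h ▸ hx)⟩
  obtain ⟨i1, i2, i3⟩ := pushB_fold (PySem.Set.add K c) (kmoves.map (pvTgt c))
    (st.dropLast, PySem.Set.discard pend c) hdlnd.1 hdisc
  have hlen1 : (PySem.Set.add K c).length = K.length + 1 := by
    rw [haddK]; simp
  refine ⟨⟨?_, i1, ?_, ?_, ?_, ?_⟩, i2, hlen1⟩
  · -- K1 nodup
    rw [haddK, List.nodup_append]
    exact ⟨hKnd, List.nodup_singleton c, by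
      intro a ha b hb
      rw [List.mem_singleton] at hb
      subst hb
      exact fun h => hcK (h ▸ ha)⟩
  · -- I ⊆ K1
    intro x hx
    exact (hmemK1 x).2 (Or.inl (hI x hx))
  · -- reach
    intro x hx
    rcases (hmemK1 x).1 hx with hx | rfl
    · exact hR x hx
    · exact reach_of_atk I K x hR hcatk
  · -- stack elements pending-valid
    intro x hx
    rcases (i3 x).1 hx with hdl | ⟨-, hnK, h4⟩
    · obtain ⟨hxK, hx4⟩ := hstK x ((hmemst x).2 (Or.inl hdl))
      refine ⟨fun h => ?_, ?_⟩
      · rcases (hmemK1 x).1 h with h' | rfl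
        · exact hxK h'
        · exact hdlnd.2 hdl
      · rw [hatk1 x]
        by_cases hsx : pvSrc x c ∈ kmoves <;> simp [hsx] <;> omega
    · exact ⟨hnK, h4⟩
  · -- coverage
    intro x hxK1 hx4
    rw [i3 x]
    by_cases h4 : 4 ≤ pvAtk K x
    · have hxK : x ∉ K := fun h => hxK1 ((hmemK1 x).2 (Or.inl h))
      rcases (hmemst x).1 (hcov x hxK h4) with hdl | rfl
      · exact Or.inl hdl
      · exact absurd ((hmemK1 x).2 (Or.inr rfl)) hxK1
    · have hsx : pvSrc x c ∈ kmoves := by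
        by_contra hno
        rw [hatk1 x, if_neg hno] at hx4
        omega
      exact Or.inr ⟨(mem_map_tgt c x kmoves).2 hsx, hxK1, hx4⟩

-- unfolding lemma for pvLoopB at a nonempty stack
theorem pvLoopB_succ_last (f : Nat) (st pend K : PySem.Set (Int × Int)) (c : Int × Int)
    (h : st.getLast? = some c) :
    pvLoopB (Nat.succ f) st pend K =
      pvLoopB f
        (kmoves.foldl (fun acc d => pvPushB (PySem.Set.add K c) acc (pvTgt c d))
          (st.dropLast, PySem.Set.discard pend c)).1
        (kmoves.foldl (fun acc d => pvPushB (PySem.Set.add K c) acc (pvTgt c d))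
          (st.dropLast, PySem.Set.discard pend c)).2
        (PySem.Set.add K c) := by
  rw [pvLoopB, h]

-- CONFLUENCE: from any two invariant states over the same initial knights with equally many
-- knights, A's FIFO loop and B's LIFO loop return the same count — at EVERY fuel
theorem confluent : ∀ (f : Nat) (I : List (Int × Int)) (q inq K1 : PySem.Set (Int × Int))
    (m : PySem.Dict (Int × Int) Int) (st pend K2 : PySem.Set (Int × Int)),
    pvInv I K1 q → (∀ x, m.getD x 0 = pvAtk K1 x) → (∀ x, x ∈ inq ↔ x ∈ q) →
    pvInv I K2 st → (∀ x, x ∈ pend ↔ x ∈ st) →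
    K1.length = K2.length →
    pvLoopA f q inq K1 m = pvLoopB f st pend K2
  | 0, I, q, inq, K1, m, st, pend, K2, _, _, _, _, _, hlen => by
    rw [pvLoopA, pvLoopB]
    exact congrArg _ hlen
  | Nat.succ f, I, [], inq, K1, m, st, pend, K2, hInv1, hm, hinq, hInv2, hpend, hlen => by
    cases hst : st.getLast? with
    | none =>
      have hstnil : st = [] := List.getLast?_eq_none_iff.1 hst
      subst hstnil
      rw [pvLoopA, pvLoopB]
      exact congrArg _ hlen
    | some c =>
      have hcst : c ∈ st := List.mem_of_getLast? hst
      exact absurd (closed_absurd I K1 K2 st c hInv1 hInv2 hcst hlen) (fun h => h)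
  | Nat.succ f, I, c :: q, inq, K1, m, st, pend, K2, hInv1, hm, hinq, hInv2, hpend, hlen => by
    cases hst : st.getLast? with
    | none =>
      have hstnil : st = [] := List.getLast?_eq_none_iff.1 hst
      subst hstnil
      exact absurd (closed_absurd I K2 K1 (c :: q) c hInv2 hInv1 (by simp) hlen.symm)
        (fun h => h)
    | some c2 =>
      obtain ⟨hA1, hA2, hA3, hA4⟩ := stepA I K1 q inq m c hInv1 hm hinq
      obtain ⟨hB1, hB2, hB3⟩ := stepB I st pend K2 c2 hInv2 hpend hst
      obtain ⟨hcK1, hc4⟩ := hInv1.2.2.2.2.1 c (by simp)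
      rw [pvLoopA, pvLoopB_succ_last f st pend K2 c2 hst]
      rw [if_neg hcK1, if_neg (by rw [hm c]; omega)]
      show pvLoopA f (kmoves.foldl (pvPushA (PySem.Set.add K1 c) c) (m, q, PySem.Set.discard inq c)).2.1
          (kmoves.foldl (pvPushA (PySem.Set.add K1 c) c) (m, q, PySem.Set.discard inq c)).2.2
          (PySem.Set.add K1 c)
          (kmoves.foldl (pvPushA (PySem.Set.add K1 c) c) (m, q, PySem.Set.discard inq c)).1 = _
      rw [List.foldl_map] at hB1 hB2
      exact confluent f I _ _ _ _ _ _ _ hA1 hA2 hA3 hB1 hB2 (by omega)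

-- the initial counts dict tracks pvAtk over the initial knights
theorem initCounts_getD (L : List (Int × Int)) (hL : L.Nodup) (x : Int × Int) :
    (pvInitCountsA L).getD x 0 = pvAtk L x := by
  unfold pvInitCountsA
  have h1 : (fun (m : PySem.Dict (Int × Int) Int) (k : Int × Int) =>
        kmoves.foldl (fun m d => m.modify (pvTgt k d) 0 (· + 1)) m) =
      (fun m k => (kmoves.map (pvTgt k)).foldl (fun m t => m.modify t 0 (· + 1)) m) := by
    funext m k
    rw [List.foldl_map]
  rw [h1, ← List.foldl_flatMap, PySem.Dict.getD_foldl_modify_add_one, PySem.Dict.getD_empty,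
    zero_add]
  exact count_flatMap_tgt L hL x

theorem initCounts_keys (L : List (Int × Int)) :
    (pvInitCountsA L).keys = PySem.Set.ofList (L.flatMap (fun k => kmoves.map (pvTgt k))) := by
  unfold pvInitCountsA
  have h1 : (fun (m : PySem.Dict (Int × Int) Int) (k : Int × Int) =>
        kmoves.foldl (fun m d => m.modify (pvTgt k d) 0 (· + 1)) m) =
      (fun m k => (kmoves.map (pvTgt k)).foldl (fun m t => m.modify t 0 (· + 1)) m) := by
    funext m k
    rw [List.foldl_map]
  rw [h1, ← List.foldl_flatMap, PySem.Dict.keys_foldl_modify _ 0 (fun _ _ v => v + 1),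
    PySem.Dict.keys_empty, PySem.Set.update_nil_left]

-- a cell with positive attack count is a target of some knight
theorem mem_allTgts_of_atk_pos (L : List (Int × Int)) (x : Int × Int) (h : 0 < pvAtk L x) :
    x ∈ L.flatMap (fun k => kmoves.map (pvTgt k)) := by
  obtain ⟨d, hd, hsrc⟩ := pvAtk_pos_mem L x h
  apply List.mem_flatMap.2
  refine ⟨pvSrc x d, hsrc, ?_⟩
  rw [mem_map_tgt, src_src]
  exact hd

-- ===== VERDICT (by name: the statement is the Claim_ definition above) =====
theorem simulate_knights_placement_spec : Claim_equal_simulate_knights_placement := by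
  unfold Claim_equal_simulate_knights_placement
  intro inp _ hpre
  unfold Spec_simulate_knights_placement simulate_knights_placement simulate_knights_placement_alt
  by_cases hdup : inp.Nodup
  · have hle : (PySem.Set.ofList inp).length ≤ inp.length := (ofList_sublist inp).length_le
    have heq := (ofList_length_eq_iff_nodup inp).2 hdup
    have hlt : ¬ (PySem.Set.ofList inp).length < inp.length := by omega
    rw [if_neg (not_not_intro heq), if_neg hlt]
    have hany : (inp.any fun r => decide (¬(-1000000000 ≤ (pvRowXY r).1 ∧
          (pvRowXY r).1 ≤ 1000000000 ∧ -1000000000 ≤ (pvRowXY r).2 ∧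
          (pvRowXY r).2 ≤ 1000000000))) =
        (inp.any fun r => decide (1000000000 < |(pvRowXY r).1| ∨ 1000000000 < |(pvRowXY r).2|)) := by
      apply List.any_congr rfl
      intro r
      rw [decide_eq_decide, lt_abs, lt_abs]
      omega
    rw [← hany]
    by_cases hb : (inp.any fun r => decide (¬(-1000000000 ≤ (pvRowXY r).1 ∧
        (pvRowXY r).1 ≤ 1000000000 ∧ -1000000000 ≤ (pvRowXY r).2 ∧
        (pvRowXY r).2 ≤ 1000000000))) = true
    · rw [if_pos hb, if_pos hb]
    · rw [if_neg hb, if_neg hb]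
      have hlen2 : ∀ r ∈ inp, r.length = 2 := by
        rcases hpre with h | h
        · exact absurd hdup h
        · exact h
      have hL0nd : (inp.map pvRowXY).Nodup := by
        apply List.Nodup.map_on _ hdup
        intro r hr r' hr' hEq
        obtain ⟨a, b, rfl⟩ := List.length_eq_two.1 (hlen2 r hr)
        obtain ⟨a', b', rfl⟩ := List.length_eq_two.1 (hlen2 r' hr')
        have h1 := congrArg Prod.fst hEq
        have h2 := congrArg Prod.snd hEq
        simp [pvRowXY] at h1 h2
        rw [h1, h2]
      have hK0 : PySem.Set.ofList (inp.map pvRowXY) = inp.map pvRowXY :=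
        PySem.Set.ofList_eq_self_of_nodup _ hL0nd
      rw [hK0]
      set L := inp.map pvRowXY with hLdef
      have hgetD := initCounts_getD L hL0nd
      have hkeys := initCounts_keys L
      -- B's initial (stack, pending)
      have hInitB : pvInitB L L =
          (L.flatMap (fun k => kmoves.map (pvTgt k))).foldl (pvPushB L) ([], []) := by
        unfold pvInitB
        have h1 : (fun (acc : List (Int × Int) × PySem.Set (Int × Int)) (k : Int × Int) =>
              kmoves.foldl (fun acc d => pvPushB L acc (pvTgt k d)) acc) =
            (fun acc k => (kmoves.map (pvTgt k)).foldl (pvPushB L) acc) := by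
          funext acc k
          rw [List.foldl_map]
        rw [h1, ← List.foldl_flatMap]
      obtain ⟨hB1, hB2, hB3⟩ := pushB_fold L (L.flatMap (fun k => kmoves.map (pvTgt k)))
        ([], []) List.nodup_nil (by simp)
      rw [← hInitB] at hB1 hB2 hB3
      -- the invariant holds for both initial states
      have hInvB : pvInv L L (pvInitB L L).1 := by
        refine ⟨hL0nd, hB1, fun x hx => hx, fun x hx => pvReach.base x hx, ?_, ?_⟩
        · intro x hx
          rcases (hB3 x).1 hx with hx | ⟨-, hnK, h4⟩
          · simp at hx
          · exact ⟨hnK, h4⟩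
        · intro x hxK hx4
          refine (hB3 x).2 (Or.inr ⟨?_, hxK, hx4⟩)
          exact mem_allTgts_of_atk_pos L x (by omega)
      have hq0nd : (pvInitQueueA (pvInitCountsA L) L).Nodup := by
        unfold pvInitQueueA
        apply List.Nodup.filter
        rw [hkeys]
        exact PySem.Set.nodup_ofList _
      have hInvA : pvInv L L (pvInitQueueA (pvInitCountsA L) L) := by
        refine ⟨hL0nd, hq0nd, fun x hx => hx, fun x hx => pvReach.base x hx, ?_, ?_⟩
        · intro x hx
          unfold pvInitQueueA at hx
          have := List.of_mem_filter hx
          simp only [decide_eq_true_eq] at this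
          rw [hgetD x] at this
          exact ⟨this.2, this.1⟩
        · intro x hxK hx4
          unfold pvInitQueueA
          refine List.mem_filter.2 ⟨?_, decide_eq_true ⟨by rw [hgetD x]; exact hx4, hxK⟩⟩
          rw [hkeys, PySem.Set.mem_ofList]
          exact mem_allTgts_of_atk_pos L x (by omega)
      exact confluent (pvFuel inp.length) L _ _ L (pvInitCountsA L) _ _ L
        hInvA hgetD (fun x => PySem.Set.mem_ofList _ x) hInvB hB2 rfl
  · have hne : (PySem.Set.ofList inp).length ≠ inp.length :=
      fun h => hdup ((ofList_length_eq_iff_nodup inp).1 h)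
    have hle : (PySem.Set.ofList inp).length ≤ inp.length := (ofList_sublist inp).length_le
    have hlt : (PySem.Set.ofList inp).length < inp.length := by omega
    rw [if_pos hne, if_pos hlt]
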